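-- pv_equiv track=rewrite | github.com/EdoardoMaines/Recommandation-System-Instagram | processing_2.py | sum_vector
-- ===== SOURCE A (Python) =====
-- def sum_vector(batch_of_post):
--     encoded_vector = []
--     for j in range(2,len(batch_of_post[0])):
--         tmp = 0
--         for i in range(0,len(batch_of_post)):
--             tmp += int(batch_of_post[i][j])
--         encoded_vector.append(tmp)
--
--
--
--     #encoded_vector = sum(batch_of_post)
--     return encoded_vector
-- ===== SOURCE B (Python) =====
-- def sum_vector(batch_of_post):
--     encoded_vector = [0] * (len(batch_of_post[0]) - 2)
--     for row in batch_of_post: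
--         encoded_vector = [acc + int(v) for acc, v in zip(encoded_vector, row[2:])]
--     return encoded_vector
-- ===== Notes on version B (the rewrite author's own statement) =====
-- stated objective: alternative
-- what changed: Row-major single pass: B initializes a zero vector of len(batch_of_post[0])-2 and folds each row into it by elementwise addition over zip, instead of A's column-major nested index loops appending one completed column sum at a time.
import Mathlib
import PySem

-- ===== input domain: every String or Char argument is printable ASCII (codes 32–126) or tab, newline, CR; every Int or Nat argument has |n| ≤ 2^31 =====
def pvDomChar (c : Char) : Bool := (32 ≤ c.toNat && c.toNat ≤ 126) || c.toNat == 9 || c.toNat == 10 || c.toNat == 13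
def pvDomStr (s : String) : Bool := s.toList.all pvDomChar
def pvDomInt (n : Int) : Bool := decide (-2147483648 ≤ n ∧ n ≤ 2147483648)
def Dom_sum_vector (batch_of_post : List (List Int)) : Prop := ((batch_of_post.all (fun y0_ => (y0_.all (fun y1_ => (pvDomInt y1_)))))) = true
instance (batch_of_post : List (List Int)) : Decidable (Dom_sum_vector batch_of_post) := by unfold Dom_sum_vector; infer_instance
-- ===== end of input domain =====

-- B replaces A's column-major nested index loops by a single row-major fold of each row into a
-- zero-initialized accumulator vector (objective: alternative decomposition, same asymptotic cost).

-- ===== PORT A =====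
-- A: for j in range(2, len(batch[0])): tmp = 0; for i in range(0, len(batch)): tmp += int(batch[i][j]); append tmp
def sum_vector (batch_of_post : List (List Int)) : List Int :=
  (PySem.List.pyRange 2 (((PySem.List.pyGet? batch_of_post 0).getD []).length : Int) 1).foldl
    (fun enc j =>
      enc ++ [(PySem.List.pyRange 0 (batch_of_post.length : Int) 1).foldl
        (fun tmp i =>
          tmp + PySem.List.pyGetD (PySem.List.pyGetD batch_of_post i []) j 0) 0])
    []

-- ===== PORT B =====
-- B: encoded = [0]*(len(batch[0])-2); for row in batch: encoded = [a+v for a,v in zip(encoded, row[2:])]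
def sum_vector_alt (batch_of_post : List (List Int)) : List Int :=
  batch_of_post.foldl
    (fun enc row => (enc.zip (PySem.List.slice row (some 2) none)).map (fun p => p.1 + p.2))
    (List.replicate (((PySem.List.pyGet? batch_of_post 0).getD []).length - 2) 0)

-- ===== PRECONDITION & SPEC =====
-- Pre_ excludes exactly the inputs on which A raises IndexError: the empty batch, and a batch
-- whose first row has more than 2 entries while some row is shorter than the first row.
def Pre_sum_vector (batch_of_post : List (List Int)) : Prop :=
  batch_of_post ≠ [] ∧
    ((batch_of_post.headD []).length ≤ 2 ∨
      ∀ row ∈ batch_of_post, (batch_of_post.headD []).length ≤ row.length)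
instance (batch_of_post : List (List Int)) : Decidable (Pre_sum_vector batch_of_post) := by
  unfold Pre_sum_vector; infer_instance

def pvWitness_sum_vector : List (List Int) := [[1, 2, 3, 4], [5, 6, 7, 8]]

def Spec_sum_vector (batch_of_post : List (List Int)) (out : List Int) : Prop :=
  out = sum_vector_alt batch_of_post
instance (batch_of_post : List (List Int)) (out : List Int) :
    Decidable (Spec_sum_vector batch_of_post out) := by
  unfold Spec_sum_vector; infer_instance

-- ===== CLAIM (what is proved, stated in full; the proofs are below) =====
def Claim_equal_sum_vector : Prop :=
  ∀ (batch_of_post : List (List Int)), Dom_sum_vector batch_of_post →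
    Pre_sum_vector batch_of_post → Spec_sum_vector batch_of_post (sum_vector batch_of_post)

-- ===== LEMMAS AND PROOFS =====

-- B's fold maintains, slot by slot, the partial column sums of the rows processed so far.
theorem bfold_char (rows : List (List Int)) (n : Nat)
    (h : ∀ row ∈ rows, n ≤ row.length - 2) (enc : List Int) (he : enc.length = n) :
    rows.foldl (fun enc row => (enc.zip (PySem.List.slice row (some 2) none)).map (fun p => p.1 + p.2)) enc
      = (List.range n).map (fun k => enc.getD k 0 + (rows.map (fun row => row.getD (2+k) 0)).sum) := by
  induction rows generalizing enc with
  | nil =>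
    simp only [List.foldl_nil, List.map_nil, List.sum_nil, add_zero]
    subst he
    apply (List.ext_getElem (by simp) ?_).symm
    intro i h1 h2
    simp [List.getD_eq_getElem?_getD, List.getElem?_eq_getElem (by simpa using h1)]
  | cons r rows ih =>
    have hr : n ≤ r.length - 2 := h r (by simp)
    rw [List.foldl_cons, show PySem.List.slice r (some 2) none = r.drop 2 by
      rw [show (2:Int) = ((2:Nat):Int) by norm_num, PySem.List.slice_from_natCast]]
    rw [ih (fun row hm => h row (by simp [hm])) _ (by simp; omega)]
    apply List.map_congr_left
    intro k hk
    have hkn : k < n := List.mem_range.mp hk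
    have hkr : 2 + k < r.length := by omega
    have h1 : k < ((enc.zip (r.drop 2)).map (fun p : Int × Int => p.1 + p.2)).length := by
      simp; omega
    rw [List.getD_eq_getElem _ _ h1]
    simp only [List.getElem_map, List.getElem_zip, List.getElem_drop]
    rw [List.getD_eq_getElem enc _ (by omega)]
    rw [List.map_cons, List.sum_cons, List.getD_eq_getElem r _ hkr]
    ring

-- A computes, column index by column index, exactly the column sums.
theorem afold_char (b : List (List Int)) :
    sum_vector b = (List.range ((((PySem.List.pyGet? b 0).getD []).length : Int) - 2).toNat).map
      (fun (k : Nat) => (b.map (fun row => row.getD (2 + k) 0)).sum) := by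
  unfold sum_vector
  rw [PySem.List.foldl_append_singleton_eq_map,
      PySem.List.pyRange_one 2 (((PySem.List.pyGet? b 0).getD []).length : Int), List.map_map]
  simp only [List.nil_append, Function.comp_def]
  apply List.map_congr_left
  intro k hk
  rw [PySem.List.foldl_pyRange_zero_pyGetD' b [] (fun tmp row => tmp + PySem.List.pyGetD row (2 + (k:Int)) 0) 0]
  rw [PySem.List.foldl_add]
  simp only [zero_add]
  congr 1
  apply List.map_congr_left
  intro row _
  rw [show (2 + (k:Int)) = ((2 + k : Nat) : Int) by push_cast; ring, PySem.List.pyGetD_natCast]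

-- ===== VERDICT (by name: the statement is the Claim_ definition above) =====
theorem sum_vector_spec : Claim_equal_sum_vector := by
  intro b _ hpre
  obtain ⟨hne, hcase⟩ := hpre
  obtain ⟨r, t, rfl⟩ : ∃ r t, b = r :: t := by
    cases b with
    | nil => exact absurd rfl hne
    | cons r t => exact ⟨r, t, rfl⟩
  unfold Spec_sum_vector sum_vector_alt
  have hget : (PySem.List.pyGet? (r :: t) 0).getD [] = r := by
    simp [PySem.List.pyGet?, PySem.List.pyIdx?]
  have hhead : (r :: t).headD [] = r := rfl
  rw [hget, afold_char, hget]
  have hall : ∀ row ∈ (r :: t), r.length - 2 ≤ row.length - 2 := by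
    intro row hm
    rcases hcase with h2 | hge
    · rw [hhead] at h2; omega
    · have := hge row hm; rw [hhead] at this; omega
  rw [bfold_char (r :: t) (r.length - 2) hall _ (by simp)]
  have hn : (((r.length : Int)) - 2).toNat = r.length - 2 := by omega
  rw [hn]
  apply List.map_congr_left
  intro k hk
  have hk' := List.mem_range.mp hk
  simp [List.getD_eq_getElem?_getD, hk']
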